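-- pv_equiv track=rewrite | github.com/varvaraparamon/algo_itis_kfu | task21/ex00.py | has_hamiltonian_path
-- ===== SOURCE A (Python) =====
-- def DFS(g, v, visited, stack):
--     visited[v] = True
--     for neighbour in g[v]:
--         if not visited[neighbour]:
--             DFS(g, neighbour, visited, stack)
--     stack.append(v)
--
-- def topological_sort(g):
--     n = len(g)
--     visited = [False] * n
--     stack = []
--
--     for v in range(n):
--         if not visited[v]:
--             DFS(g, v, visited, stack)
--
--     return stack[::-1]
--
-- def has_hamiltonian_path(g):
--     top_order = topological_sort(g)
--
--     for i in range(len(top_order) - 1):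
--         u = top_order[i]
--         v = top_order[i + 1]
--         if v not in g[u]:
--             return False
--     return True
-- ===== SOURCE B (Python) =====
-- def has_hamiltonian_path(g):
--     n = len(g)
--     visited = [False] * n
--     post = []  # postorder of the DFS forest
--     for s in range(n):
--         if visited[s]:
--             continue
--         visited[s] = True
--         frames = [(s, 0)]  # explicit stack of (node, next neighbour position)
--         while frames:
--             v, i = frames.pop()
--             row = g[v]
--             if i < len(row):
--                 frames.append((v, i + 1))
--                 w = row[i]
--                 if not visited[w]:
--                     visited[w] = True
--                     frames.append((w, 0))
--             else:
--                 post.append(v)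
--     order = post[::-1]
--     for i in range(len(order) - 1):
--         if order[i + 1] not in g[order[i]]:
--             return False
--     return True
-- ===== Notes on version B (the rewrite author's own statement) =====
-- stated objective: alternative
-- what changed: The recursive DFS postorder (topological sort) is replaced by an iterative DFS with an explicit stack of (node, next-neighbour-position) frames, so no Python recursion is used; the final consecutive-pair check is unchanged.
import Mathlib
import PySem

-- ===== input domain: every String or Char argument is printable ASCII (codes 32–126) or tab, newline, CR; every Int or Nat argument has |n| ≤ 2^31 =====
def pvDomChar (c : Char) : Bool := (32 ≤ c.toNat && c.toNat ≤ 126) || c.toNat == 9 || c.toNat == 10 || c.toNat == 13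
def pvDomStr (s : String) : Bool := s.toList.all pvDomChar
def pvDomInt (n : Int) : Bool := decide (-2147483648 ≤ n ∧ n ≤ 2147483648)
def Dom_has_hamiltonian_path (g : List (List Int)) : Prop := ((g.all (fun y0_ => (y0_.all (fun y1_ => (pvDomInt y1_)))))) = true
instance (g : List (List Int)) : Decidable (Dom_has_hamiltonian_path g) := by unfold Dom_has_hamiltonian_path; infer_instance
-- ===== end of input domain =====

-- B replaces A's recursive DFS postorder by an iterative DFS with an explicit stack of
-- (node, next-neighbour-position) frames (same traversal, no recursion); same final pair check.

-- ===== PORT A =====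
-- DFS(g, v, visited, stack): the Python recursion, made total by a fuel guard (the guard is
-- never reached when fuel ≥ number of unvisited nodes; the caller passes len(g)).
mutual
def dfsA (g : List (List Int)) : Nat → Int → List Bool → List Int → List Bool × List Int
  | 0, _, visited, stack => (visited, stack)            -- unreachable under sufficient fuel
  | f+1, v, visited, stack =>
    let visited1 := PySem.List.pySetD visited v true     -- visited[v] = True
    let r := dfsNbrsA g f (PySem.List.pyGetD g v []) visited1 stack   -- for neighbour in g[v]: …
    (r.1, r.2 ++ [v])                                    -- stack.append(v)
  termination_by f _ _ _ => (f, 0)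
def dfsNbrsA (g : List (List Int)) : Nat → List Int → List Bool → List Int → List Bool × List Int
  | _, [], visited, stack => (visited, stack)
  | f, w :: rest, visited, stack =>
    let r := if PySem.List.pyGetD visited w false then (visited, stack) else dfsA g f w visited stack
    dfsNbrsA g f rest r.1 r.2
  termination_by f ns _ _ => (f, ns.length + 1)
end

def topologicalSortA (g : List (List Int)) : List Int :=
  let n := g.length
  let r := (PySem.List.pyRange 0 n 1).foldl
    (fun (p : List Bool × List Int) v =>
      if PySem.List.pyGetD p.1 v false then p else dfsA g n v p.1 p.2)
    (List.replicate n false, [])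
  (PySem.List.slice? r.2 none none (-1)).getD []         -- stack[::-1]

def has_hamiltonian_path (g : List (List Int)) : Bool :=
  let top := topologicalSortA g
  (PySem.List.pyRange 0 (PySem.List.len top - 1) 1).all (fun i =>
    let u := PySem.List.pyGetD top i 0
    let v := PySem.List.pyGetD top (i + 1) 0
    (PySem.List.pyGetD g u []).contains v)               -- if v not in g[u]: return False

-- ===== PORT B =====
-- the while-frames loop of Source B; fuel (n+1)*(E+1) bounds the total number of pops
-- (each visited node v contributes len(g[v])+1 pops), so the 0-guard is never reached.
def machineB (g : List (List Int)) : Nat → List (Int × Nat) → List Bool → List Int → List Bool × List Int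
  | 0, _, visited, post => (visited, post)               -- unreachable under sufficient fuel
  | _+1, [], visited, post => (visited, post)            -- while frames:
  | f+1, (v, i) :: frames, visited, post =>              -- v, i = frames.pop()
    let row := PySem.List.pyGetD g v []
    if i < row.length then
      let w := PySem.List.pyGetD row (i : Int) 0
      if PySem.List.pyGetD visited w false then
        machineB g f ((v, i+1) :: frames) visited post
      else
        machineB g f ((w, 0) :: (v, i+1) :: frames) (PySem.List.pySetD visited w true) post
    else
      machineB g f frames visited (post ++ [v])          -- post.append(v)

def has_hamiltonian_path_alt (g : List (List Int)) : Bool :=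
  let n := g.length
  let fuel := (n + 1) * ((g.map List.length).sum + 1)
  let r := (PySem.List.pyRange 0 n 1).foldl
    (fun (p : List Bool × List Int) s =>
      if PySem.List.pyGetD p.1 s false then p
      else machineB g fuel [(s, 0)] (PySem.List.pySetD p.1 s true) p.2)
    (List.replicate n false, [])
  let order := r.2.reverse                               -- post[::-1]
  (PySem.List.pyRange 0 (PySem.List.len order - 1) 1).all (fun i =>
    let u := PySem.List.pyGetD order i 0
    let v := PySem.List.pyGetD order (i + 1) 0
    (PySem.List.pyGetD g u []).contains v)

-- ===== PRECONDITION & SPEC =====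
-- Pre_ excludes exactly the inputs on which A raises (IndexError): an adjacency entry w with
-- w < -len(g) or w ≥ len(g) is eventually indexed by visited[w] / g[w] and A raises there.
def Pre_has_hamiltonian_path (g : List (List Int)) : Prop :=
  ∀ row ∈ g, ∀ w ∈ row, PySem.Raise.InRange g.length w
instance (g : List (List Int)) : Decidable (Pre_has_hamiltonian_path g) := by
  unfold Pre_has_hamiltonian_path; infer_instance
def pvWitness_has_hamiltonian_path : List (List Int) := [[1], [2], []]

def Spec_has_hamiltonian_path (g : List (List Int)) (out : Bool) : Prop := out = has_hamiltonian_path_alt g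
instance (g : List (List Int)) (out : Bool) : Decidable (Spec_has_hamiltonian_path g out) := by unfold Spec_has_hamiltonian_path; infer_instance

-- ===== CLAIM (what is proved, stated in full; the proofs are below) =====
def Claim_equal_has_hamiltonian_path : Prop := ∀ (g : List (List Int)), Dom_has_hamiltonian_path g → Pre_has_hamiltonian_path g → Spec_has_hamiltonian_path g (has_hamiltonian_path g)

-- ===== LEMMAS AND PROOFS =====

-- number of unvisited entries
def cF (vis : List Bool) : Nat := vis.countP (fun b => !b)

lemma idxNorm (n : Nat) (i : Int) (h : PySem.Raise.InRange n i) :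
    ∃ j : Nat, j < n ∧ PySem.List.pyIdx? n i = some j := by
  obtain ⟨h1, h2⟩ := h
  unfold PySem.List.pyIdx?
  by_cases h3 : 0 ≤ i
  · rw [if_pos h3, if_pos h2]
    exact ⟨i.toNat, by omega, rfl⟩
  · rw [if_neg h3, if_pos h1]
    exact ⟨n - (-i).toNat, by omega, rfl⟩

lemma pyGetD_norm {α : Type} (ys : List α) (i : Int) (j : Nat) (d : α)
    (hj : PySem.List.pyIdx? ys.length i = some j) :
    PySem.List.pyGetD ys i d = ys.getD j d := by
  simp [PySem.List.pyGetD, PySem.List.pyGet?, hj, List.getD_eq_getElem?_getD]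

lemma pySetD_norm {α : Type} (ys : List α) (i : Int) (j : Nat) (x : α)
    (hj : PySem.List.pyIdx? ys.length i = some j) :
    PySem.List.pySetD ys i x = ys.set j x := by
  simp [PySem.List.pySetD, PySem.List.pySet?, hj]

lemma cF_set_true (vis : List Bool) (j : Nat) (hj : j < vis.length)
    (hf : vis.getD j false = false) : cF (vis.set j true) + 1 = cF vis := by
  have hx : vis[j] = false := by rw [← List.getD_eq_getElem vis false hj]; exact hf
  have hpos : 0 < vis.countP (fun b => !b) := by
    refine List.countP_pos_iff.2 ⟨vis[j], List.getElem_mem hj, by simp [hx]⟩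
  simp [cF, List.countP_set hj, hx]
  omega

lemma cF_mono (xs : List Bool) : ∀ (ys : List Bool), ys.length = xs.length →
    (∀ j : Nat, xs.getD j false = true → ys.getD j false = true) → cF ys ≤ cF xs := by
  induction xs with
  | nil => intro ys hl _; simp [List.length_eq_zero_iff.mp hl, cF]
  | cons x xs ih =>
    intro ys hl hm
    cases ys with
    | nil => simp at hl
    | cons y ys =>
      have h0 := hm 0
      have ht := ih ys (by simpa using hl) (fun j hj => hm (j+1) (by simpa using hj))
      simp only [cF, List.countP_cons] at *
      cases x <;> cases y <;> simp_all
      omega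

lemma pySetD_true_mono (vis : List Bool) (w : Int) (j : Nat)
    (h : vis.getD j false = true) :
    (PySem.List.pySetD vis w true).getD j false = true := by
  unfold PySem.List.pySetD PySem.List.pySet?
  cases hidx : PySem.List.pyIdx? vis.length w with
  | none => simpa [hidx] using h
  | some k =>
    simp only [Option.map_some, Option.getD_some]
    rw [List.getD_eq_getElem?_getD, List.getElem?_set]
    rw [List.getD_eq_getElem?_getD] at h
    by_cases hkj : k = j
    · subst hkj
      by_cases hk : k < vis.length
      · simp [hk]
      · rw [List.getElem?_eq_none (by omega : vis.length ≤ k)] at h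
        simp at h
    · simpa [hkj] using h

lemma dfsN_inv (g : List (List Int)) : ∀ (f : Nat) (ns : List Int) (vis : List Bool) (st : List Int),
    ((dfsNbrsA g f ns vis st).1.length = vis.length) ∧
    (∀ j : Nat, vis.getD j false = true → (dfsNbrsA g f ns vis st).1.getD j false = true) := by
  intro f
  induction f using Nat.strong_induction_on with
  | _ f fIH =>
    intro ns
    induction ns with
    | nil => intro vis st; simp [dfsNbrsA]
    | cons w rest ih =>
      intro vis st
      by_cases hw : PySem.List.pyGetD vis w false
      · simpa [dfsNbrsA, hw] using ih vis st
      · cases f with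
        | zero => simpa [dfsNbrsA, hw, dfsA] using ih vis st
        | succ f' =>
          have hA := fIH f' (by omega) (PySem.List.pyGetD g w []) (PySem.List.pySetD vis w true) st
          have hR := ih (dfsNbrsA g f' (PySem.List.pyGetD g w []) (PySem.List.pySetD vis w true) st).1
            ((dfsNbrsA g f' (PySem.List.pyGetD g w []) (PySem.List.pySetD vis w true) st).2 ++ [w])
          simp only [dfsNbrsA, dfsA, hw, if_neg, Bool.false_eq_true, not_false_eq_true]
          constructor
          · rw [hR.1, hA.1, PySem.List.length_pySetD]
          · intro j hj
            exact hR.2 j (hA.2 j (pySetD_true_mono vis w j hj))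

lemma machineB_nil (g : List (List Int)) (f : Nat) (vis : List Bool) (post : List Int) :
    machineB g f [] vis post = (vis, post) := by
  cases f <;> rfl

lemma machineB_step (g : List (List Int)) (f : Nat) (v : Int) (i : Nat)
    (fr : List (Int × Nat)) (vis : List Bool) (post : List Int) :
    machineB g (f+1) ((v,i)::fr) vis post =
      (if i < (PySem.List.pyGetD g v []).length then
         (if PySem.List.pyGetD vis (PySem.List.pyGetD (PySem.List.pyGetD g v []) (i:Int) 0) false then
            machineB g f ((v, i+1)::fr) vis post
          else machineB g f (((PySem.List.pyGetD (PySem.List.pyGetD g v []) (i:Int) 0), 0)::(v,i+1)::fr)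
                 (PySem.List.pySetD vis (PySem.List.pyGetD (PySem.List.pyGetD g v []) (i:Int) 0) true) post)
       else machineB g f fr vis (post ++ [v])) := rfl

lemma simN (g : List (List Int)) (hPre : Pre_has_hamiltonian_path g) :
    ∀ (f : Nat) (v : Int) (i : Nat) (vis : List Bool) (post : List Int) (fr : List (Int × Nat)),
    vis.length = g.length → PySem.Raise.InRange g.length v → cF vis ≤ f →
    ∃ k : Nat,
      k + (cF (dfsNbrsA g f ((PySem.List.pyGetD g v []).drop i) vis post).1) * ((g.map List.length).sum + 1)
        ≤ ((PySem.List.pyGetD g v []).length - i + 1) + cF vis * ((g.map List.length).sum + 1) ∧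
      ∀ fm : Nat, machineB g (fm + k) ((v,i)::fr) vis post
          = machineB g fm fr (dfsNbrsA g f ((PySem.List.pyGetD g v []).drop i) vis post).1
                             ((dfsNbrsA g f ((PySem.List.pyGetD g v []).drop i) vis post).2 ++ [v]) := by
  intro f
  induction f using Nat.strong_induction_on with
  | _ f fIH =>
  intro v
  suffices aux : ∀ (m i : Nat) (vis : List Bool) (post : List Int) (fr : List (Int × Nat)),
      (PySem.List.pyGetD g v []).length - i ≤ m →
      vis.length = g.length → PySem.Raise.InRange g.length v → cF vis ≤ f →
      ∃ k : Nat,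
        k + (cF (dfsNbrsA g f ((PySem.List.pyGetD g v []).drop i) vis post).1) * ((g.map List.length).sum + 1)
          ≤ ((PySem.List.pyGetD g v []).length - i + 1) + cF vis * ((g.map List.length).sum + 1) ∧
        ∀ fm : Nat, machineB g (fm + k) ((v,i)::fr) vis post
            = machineB g fm fr (dfsNbrsA g f ((PySem.List.pyGetD g v []).drop i) vis post).1
                               ((dfsNbrsA g f ((PySem.List.pyGetD g v []).drop i) vis post).2 ++ [v]) by
    intro i vis post fr h1 h2 h3
    exact aux ((PySem.List.pyGetD g v []).length - i) i vis post fr le_rfl h1 h2 h3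
  intro m
  induction m with
  | zero =>
    intro i vis post fr hm hlen hv hf
    have hge : ¬ i < (PySem.List.pyGetD g v []).length := by omega
    refine ⟨1, ?_, ?_⟩
    · rw [List.drop_eq_nil_of_le (by omega)]
      simp [dfsNbrsA]
    · intro fm
      rw [List.drop_eq_nil_of_le (by omega)]
      rw [machineB_step, if_neg hge]
      simp [dfsNbrsA]
  | succ m mIH =>
    intro i vis post fr hm hlen hv hf
    by_cases hi : i < (PySem.List.pyGetD g v []).length
    case neg =>
      refine ⟨1, ?_, ?_⟩
      · rw [List.drop_eq_nil_of_le (by omega)]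
        simp [dfsNbrsA]
      · intro fm
        rw [List.drop_eq_nil_of_le (by omega)]
        rw [machineB_step, if_neg hi]
        simp [dfsNbrsA]
    case pos =>
      have hdrop : (PySem.List.pyGetD g v []).drop i
          = (PySem.List.pyGetD g v [])[i] :: (PySem.List.pyGetD g v []).drop (i+1) :=
        List.drop_eq_getElem_cons hi
      have hwexpr : PySem.List.pyGetD (PySem.List.pyGetD g v []) (i:Int) 0
          = (PySem.List.pyGetD g v [])[i] := by
        rw [PySem.List.pyGetD_natCast, List.getD_eq_getElem _ _ hi]
      have hrow_mem : PySem.List.pyGetD g v [] ∈ g := PySem.List.pyGetD_mem g [] hv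
      have hwIn : PySem.Raise.InRange g.length ((PySem.List.pyGetD g v [])[i]) :=
        hPre _ hrow_mem _ (List.getElem_mem hi)
      obtain ⟨jw, hjw, hjidx⟩ := idxNorm g.length ((PySem.List.pyGetD g v [])[i]) hwIn
      have hjidx' : PySem.List.pyIdx? vis.length ((PySem.List.pyGetD g v [])[i]) = some jw := by
        rw [hlen]; exact hjidx
      have hgetw : PySem.List.pyGetD vis ((PySem.List.pyGetD g v [])[i]) false = vis.getD jw false :=
        pyGetD_norm vis _ jw false hjidx'
      by_cases hvw : vis.getD jw false
      case pos =>
        -- neighbour already visited: one machine step, A skips it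
        obtain ⟨k', hb', he'⟩ := mIH (i+1) vis post fr (by omega) hlen hv hf
        have hN : dfsNbrsA g f ((PySem.List.pyGetD g v []).drop i) vis post
            = dfsNbrsA g f ((PySem.List.pyGetD g v []).drop (i+1)) vis post := by
          rw [hdrop, dfsNbrsA, hgetw]
          simp only [hvw, if_true]
        refine ⟨k' + 1, ?_, ?_⟩
        · rw [hN]
          generalize cF (dfsNbrsA g f ((PySem.List.pyGetD g v []).drop (i+1)) vis post).1
            * ((g.map List.length).sum + 1) = A at hb' ⊢
          generalize cF vis * ((g.map List.length).sum + 1) = B at hb' ⊢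
          omega
        · intro fm
          rw [hN]
          have : fm + (k' + 1) = (fm + k') + 1 := by omega
          rw [this, machineB_step, if_pos hi, hwexpr, hgetw, if_pos hvw]
          exact he' fm
      case neg =>
        have hvwf : vis.getD jw false = false := by simpa using hvw
        have hcset : cF (vis.set jw true) + 1 = cF vis :=
          cF_set_true vis jw (by omega) hvwf
        cases f with
        | zero => omega
        | succ f' =>
        have hset : PySem.List.pySetD vis ((PySem.List.pyGetD g v [])[i]) true = vis.set jw true :=
          pySetD_norm vis _ jw true hjidx'
        have hA : dfsNbrsA g (f'+1) ((PySem.List.pyGetD g v []).drop i) vis post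
            = dfsNbrsA g (f'+1) ((PySem.List.pyGetD g v []).drop (i+1))
                (dfsNbrsA g f' (PySem.List.pyGetD g ((PySem.List.pyGetD g v [])[i]) []) (vis.set jw true) post).1
                ((dfsNbrsA g f' (PySem.List.pyGetD g ((PySem.List.pyGetD g v [])[i]) []) (vis.set jw true) post).2
                  ++ [(PySem.List.pyGetD g v [])[i]]) := by
          rw [hdrop, dfsNbrsA, hgetw]
          simp only [hvwf, Bool.false_eq_true, if_false]
          rw [dfsA, hset]
        obtain ⟨k1, hb1, he1⟩ := fIH f' (by omega) ((PySem.List.pyGetD g v [])[i]) 0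
          (vis.set jw true) post ((v, i+1)::fr)
          (by rw [List.length_set]; exact hlen) hwIn (by omega)
        simp only [List.drop_zero] at hb1 he1
        have hinv := dfsN_inv g f' (PySem.List.pyGetD g ((PySem.List.pyGetD g v [])[i]) [])
          (vis.set jw true) post
        have hRRlen : (dfsNbrsA g f' (PySem.List.pyGetD g ((PySem.List.pyGetD g v [])[i]) [])
            (vis.set jw true) post).1.length = g.length := by
          rw [hinv.1, List.length_set]; exact hlen
        have hRRcF : cF (dfsNbrsA g f' (PySem.List.pyGetD g ((PySem.List.pyGetD g v [])[i]) [])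
            (vis.set jw true) post).1 ≤ cF (vis.set jw true) :=
          cF_mono (vis.set jw true) _ hinv.1 hinv.2
        obtain ⟨k2, hb2, he2⟩ := mIH (i+1)
          (dfsNbrsA g f' (PySem.List.pyGetD g ((PySem.List.pyGetD g v [])[i]) []) (vis.set jw true) post).1
          ((dfsNbrsA g f' (PySem.List.pyGetD g ((PySem.List.pyGetD g v [])[i]) []) (vis.set jw true) post).2
            ++ [(PySem.List.pyGetD g v [])[i]]) fr (by omega) hRRlen hv (by omega)
        refine ⟨k1 + k2 + 1, ?_, ?_⟩
        · rw [hA]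
          have hrowW_le : (PySem.List.pyGetD g ((PySem.List.pyGetD g v [])[i]) []).length
              ≤ (g.map List.length).sum :=
            List.le_sum_of_mem (List.mem_map_of_mem (PySem.List.pyGetD_mem g [] hwIn))
          have hMeq : cF (vis.set jw true) * ((g.map List.length).sum + 1)
                + ((g.map List.length).sum + 1) = cF vis * ((g.map List.length).sum + 1) := by
            rw [← hcset, Nat.succ_mul]
          generalize cF (dfsNbrsA g (f'+1) ((PySem.List.pyGetD g v []).drop (i+1))
              (dfsNbrsA g f' (PySem.List.pyGetD g ((PySem.List.pyGetD g v [])[i]) []) (vis.set jw true) post).1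
              ((dfsNbrsA g f' (PySem.List.pyGetD g ((PySem.List.pyGetD g v [])[i]) []) (vis.set jw true) post).2
                ++ [(PySem.List.pyGetD g v [])[i]])).1 * ((g.map List.length).sum + 1) = A2 at hb2 ⊢
          generalize cF (dfsNbrsA g f' (PySem.List.pyGetD g ((PySem.List.pyGetD g v [])[i]) [])
              (vis.set jw true) post).1 * ((g.map List.length).sum + 1) = B2 at hb1 hb2
          generalize cF (vis.set jw true) * ((g.map List.length).sum + 1) = C2 at hb1 hMeq
          generalize cF vis * ((g.map List.length).sum + 1) = D2 at hMeq ⊢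
          omega
        · intro fm
          rw [hA]
          have e1 : fm + (k1 + k2 + 1) = ((fm + k2) + k1) + 1 := by omega
          rw [e1, machineB_step, if_pos hi, hwexpr, hgetw]
          simp only [hvwf, Bool.false_eq_true, if_false]
          rw [hset, he1 (fm + k2)]
          exact he2 fm

lemma foldSim (g : List (List Int)) (hPre : Pre_has_hamiltonian_path g) :
    ∀ (l : List Int) (vis : List Bool) (st : List Int),
    (∀ x ∈ l, 0 ≤ x ∧ x < (g.length : Int)) → vis.length = g.length →
    l.foldl (fun (p : List Bool × List Int) v =>
        if PySem.List.pyGetD p.1 v false then p else dfsA g g.length v p.1 p.2) (vis, st)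
    = l.foldl (fun (p : List Bool × List Int) s =>
        if PySem.List.pyGetD p.1 s false then p
        else machineB g ((g.length + 1) * ((g.map List.length).sum + 1)) [(s, 0)]
               (PySem.List.pySetD p.1 s true) p.2) (vis, st) := by
  intro l
  induction l with
  | nil => intro vis st _ _; rfl
  | cons x l ih =>
    intro vis st hmem hlen
    have hx := hmem x (List.mem_cons_self)
    have hxIn : PySem.Raise.InRange g.length x := ⟨by omega, hx.2⟩
    obtain ⟨jx, hjx, hjidx⟩ := idxNorm g.length x hxIn
    have hjidx' : PySem.List.pyIdx? vis.length x = some jx := by rw [hlen]; exact hjidx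
    have hgetx : PySem.List.pyGetD vis x false = vis.getD jx false := pyGetD_norm vis x jx false hjidx'
    have hsetx : PySem.List.pySetD vis x true = vis.set jx true := pySetD_norm vis x jx true hjidx'
    simp only [List.foldl_cons]
    by_cases hvx : vis.getD jx false
    · rw [if_pos (by rw [hgetx]; exact hvx), if_pos (by rw [hgetx]; exact hvx)]
      exact ih vis st (fun y hy => hmem y (List.mem_cons_of_mem x hy)) hlen
    · have hvxf : vis.getD jx false = false := by simpa using hvx
      rw [if_neg (by rw [hgetx, hvxf]; simp), if_neg (by rw [hgetx, hvxf]; simp)]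
      have hcset : cF (vis.set jx true) + 1 = cF vis :=
        cF_set_true vis jx (by omega) hvxf
      obtain ⟨n', hn⟩ : ∃ n', g.length = n' + 1 := ⟨g.length - 1, by omega⟩
      have hlen' : (vis.set jx true).length = g.length := by rw [List.length_set]; exact hlen
      have hcle : cF vis ≤ n' + 1 := by
        have := List.countP_le_length (l := vis) (p := fun b => !b)
        simp only [cF]; omega
      obtain ⟨k, hb, he⟩ := simN g hPre n' x 0 (vis.set jx true) st [] hlen' hxIn (by omega)
      simp only [List.drop_zero] at hb he
      have hrow_le : (PySem.List.pyGetD g x []).length ≤ (g.map List.length).sum :=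
        List.le_sum_of_mem (List.mem_map_of_mem (PySem.List.pyGetD_mem g [] hxIn))
      have hk : k ≤ (g.length + 1) * ((g.map List.length).sum + 1) := by
        have hC : cF (vis.set jx true) ≤ n' := by omega
        have h1 : cF (vis.set jx true) * ((g.map List.length).sum + 1)
            ≤ n' * ((g.map List.length).sum + 1) :=
          Nat.mul_le_mul_right _ hC
        have h2 : (g.length + 1) * ((g.map List.length).sum + 1)
            = (n' + 2) * ((g.map List.length).sum + 1) := by rw [hn]
        have h3 : (n' + 2) * ((g.map List.length).sum + 1)
            = n' * ((g.map List.length).sum + 1) + 2 * ((g.map List.length).sum + 1) := by ring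
        generalize hM : (g.map List.length).sum + 1 = M at *
        omega
      have hstepA : dfsA g g.length x vis st
          = ((dfsNbrsA g n' (PySem.List.pyGetD g x []) (vis.set jx true) st).1,
             (dfsNbrsA g n' (PySem.List.pyGetD g x []) (vis.set jx true) st).2 ++ [x]) := by
        conv_lhs => rw [hn]
        rw [dfsA, hsetx]
      have hstepB : machineB g ((g.length + 1) * ((g.map List.length).sum + 1)) [(x, 0)]
            (PySem.List.pySetD vis x true) st
          = ((dfsNbrsA g n' (PySem.List.pyGetD g x []) (vis.set jx true) st).1,
             (dfsNbrsA g n' (PySem.List.pyGetD g x []) (vis.set jx true) st).2 ++ [x]) := by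
        have e1 : (g.length + 1) * ((g.map List.length).sum + 1)
            = ((g.length + 1) * ((g.map List.length).sum + 1) - k) + k := by omega
        rw [hsetx, e1, he ((g.length + 1) * ((g.map List.length).sum + 1) - k), machineB_nil]
      rw [hstepA, hstepB]
      refine ih _ _ (fun y hy => hmem y (List.mem_cons_of_mem x hy)) ?_
      have hinv := dfsN_inv g n' (PySem.List.pyGetD g x []) (vis.set jx true) st
      rw [hinv.1, List.length_set, hlen]

-- ===== VERDICT (by name: the statement is the Claim_ definition above) =====
theorem has_hamiltonian_path_spec : Claim_equal_has_hamiltonian_path := by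
  intro g _hD hPre
  unfold Spec_has_hamiltonian_path has_hamiltonian_path has_hamiltonian_path_alt topologicalSortA
  simp only [PySem.List.slice?_none_none_neg_one, Option.getD_some]
  rw [foldSim g hPre (PySem.List.pyRange 0 g.length 1) (List.replicate g.length false) []
    (fun x hx => PySem.List.mem_pyRange_one.mp hx) (by simp)]
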